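-- pv_equiv track=rewrite | github.com/Shisir99/Automation-Utility | har2postman.py | generate_prerequest_script
-- ===== SOURCE A (Python) =====
-- def generate_prerequest_script(sol_details):
--
--     sol_list = []
--     cu_list = []
--     ent_list = []
--     attr_list = []
--     final_list =[]
--     dict1 = {}
--     script=[]
--     for i in range(len(sol_details)):
--         for j in sol_details[i]:
--             ii = i +1
--             sol_list.append(f"SolutionName{ii}")
--             dict1[f"SolutionName{ii}"] = j
--
--             for k in sol_details[i][j]:
--                 jj = len(cu_list)+1
--                 cu_list.append(f"CuName{jj}")
--                 dict1[f"CuName{jj}"] = k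
--
--                 for l in sol_details[i][j][k]:
--                     kk = len(ent_list)+1
--                     ent_list.append(f"EntityName{kk}")
--                     dict1[f"EntityName{kk}"] = l
--
--                     for m in range(len(sol_details[i][j][k][l])):
--                         attr_list.append(f"AttributeName{kk}{m+1}")
--                         dict1[f"AttributeName{kk}{m+1}"] = sol_details[i][j][k][l][m]
--
--     script.append("pm.variables.clear();\r")
--     script.append("\r")
--     script.append("pm.variables.set('RandomNumber', (new Date()).toISOString().replace(/[^0-9]/g, '').slice(0, -3) + '' + Math.floor((Math.random() * 100000) + 1));\r")
--     script.append("\r")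
--
--     for key in dict1:
--         if "AttributeName" not in key:
--             script.append(f"pm.variables.set('{key}', '{dict1[key]}'+ pm.variables.get('RandomNumber') );\r")
--         else:
--            script.append(f"pm.variables.set('{key}','{dict1[key]}');\r")
--
--     dic2 = {}
--     for key in dict1:
--         dic2[dict1[key]] = key
--
--     return dic2,script
-- ===== SOURCE B (Python) =====
-- PREFIX = ("SolutionName", "CuName", "EntityName")
--
-- def _emit(node, depth, pairs, counters):
--     # depth 0..2: node is a dict of name -> subnode; depth 3: node is the attribute list
--     if depth == 3:
--         ent = counters[2]
--         pairs.extend((f"AttributeName{ent}{m + 1}", a) for m, a in enumerate(node))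
--         return
--     for name, sub in node.items():
--         if depth == 0:
--             num = counters[0]          # set by the caller from the outer index
--         else:
--             counters[depth] += 1
--             num = counters[depth]
--         pairs.append((PREFIX[depth] + str(num), name))
--         _emit(sub, depth + 1, pairs, counters)
--
-- def generate_prerequest_script(sol_details):
--     pairs, counters = [], [0, 0, 0]
--     for i, sol in enumerate(sol_details, 1):
--         counters[0] = i
--         _emit(sol, 0, pairs, counters)
--     dict1 = dict(pairs)                # last value wins, key keeps its first position
--     script = [
--         "pm.variables.clear();\r",
--         "\r",
--         "pm.variables.set('RandomNumber', (new Date()).toISOString().replace(/[^0-9]/g, '').slice(0, -3) + '' + Math.floor((Math.random() * 100000) + 1));\r",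
--         "\r",
--     ] + [
--         (f"pm.variables.set('{k}','{v}');\r" if "AttributeName" in k
--          else f"pm.variables.set('{k}', '{v}'+ pm.variables.get('RandomNumber') );\r")
--         for k, v in dict1.items()
--     ]
--     dic2 = {v: k for k, v in dict1.items()}
--     return dic2, script
-- ===== Notes on version B (the rewrite author's own statement) =====
-- stated objective: alternative
-- what changed: Replaces A's four hand-numbered nested loops that grow four name lists and a dict in lockstep with a depth-indexed recursive emitter that flattens the nesting into one ordered (name, value) pair list, from which dict1 (last-wins via dict()), the script and the reversed dic2 are each built in a single separate pass.
import Mathlib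
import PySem

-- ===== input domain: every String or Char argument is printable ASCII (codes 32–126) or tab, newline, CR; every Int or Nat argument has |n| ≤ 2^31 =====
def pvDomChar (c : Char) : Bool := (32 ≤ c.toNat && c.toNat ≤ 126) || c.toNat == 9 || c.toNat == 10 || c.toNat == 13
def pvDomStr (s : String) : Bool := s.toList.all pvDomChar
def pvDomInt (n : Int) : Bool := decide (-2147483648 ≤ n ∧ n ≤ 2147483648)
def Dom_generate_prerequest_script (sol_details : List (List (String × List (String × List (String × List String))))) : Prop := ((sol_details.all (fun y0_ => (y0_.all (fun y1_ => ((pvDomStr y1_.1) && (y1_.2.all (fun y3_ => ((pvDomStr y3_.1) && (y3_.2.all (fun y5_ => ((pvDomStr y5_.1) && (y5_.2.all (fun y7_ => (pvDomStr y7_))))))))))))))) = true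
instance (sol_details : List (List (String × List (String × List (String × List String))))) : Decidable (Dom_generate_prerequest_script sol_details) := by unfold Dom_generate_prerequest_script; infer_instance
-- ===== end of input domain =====

-- B replaces A's four nested loops over index-computed names with a depth-indexed recursive
-- emitter that collects (name, value) pairs once and builds dict1/script/dic2 from that list
-- (objective: alternative decomposition, same asymptotic cost).

-- ===== PORT A =====
-- state of A's nested loops: the four name lists and dict1
structure ASt where
  sols  : List String
  cus   : List String
  ents  : List String
  attrs : List String
  d     : PySem.Dict String String
deriving Repr, DecidableEq

-- innermost loop: for m in range(len(attrs)) (enumerate from 1 gives m+1 directly)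
def aAttrLoop (kk : Int) (attrs : List String) (st : ASt) : ASt :=
  (PySem.List.enumerate attrs 1).foldl (fun st p =>
    let nm := "AttributeName" ++ PySem.Int.toStr kk ++ PySem.Int.toStr p.1
    { st with attrs := st.attrs ++ [nm], d := st.d.insert nm p.2 }) st

-- for l in sol_details[i][j][k]
def aEntLoop (node : List (String × List String)) (st : ASt) : ASt :=
  node.foldl (fun st p =>
    let kk : Int := (st.ents.length : Int) + 1
    let nm := "EntityName" ++ PySem.Int.toStr kk
    aAttrLoop kk p.2 { st with ents := st.ents ++ [nm], d := st.d.insert nm p.1 }) st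

-- for k in sol_details[i][j]
def aCuLoop (node : List (String × List (String × List String))) (st : ASt) : ASt :=
  node.foldl (fun st p =>
    let jj : Int := (st.cus.length : Int) + 1
    let nm := "CuName" ++ PySem.Int.toStr jj
    aEntLoop p.2 { st with cus := st.cus ++ [nm], d := st.d.insert nm p.1 }) st

-- for i in range(len(sol_details)): for j in sol_details[i]  (ii = i+1 via enumerate from 1)
def aSolLoop (sol_details : List (List (String × List (String × List (String × List String))))) (st : ASt) : ASt :=
  (PySem.List.enumerate sol_details 1).foldl (fun st q =>
    q.2.foldl (fun st p =>
      let nm := "SolutionName" ++ PySem.Int.toStr q.1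
      aCuLoop p.2 { st with sols := st.sols ++ [nm], d := st.d.insert nm p.1 }) st) st

def aHeader : List String :=
  ["pm.variables.clear();\r", "\r",
   "pm.variables.set('RandomNumber', (new Date()).toISOString().replace(/[^0-9]/g, '').slice(0, -3) + '' + Math.floor((Math.random() * 100000) + 1));\r",
   "\r"]

def generate_prerequest_script (sol_details : List (List (String × List (String × List (String × List String))))) : (List (String × String)) × List String :=
  let st := aSolLoop sol_details ⟨[], [], [], [], PySem.Dict.empty⟩
  let script := st.d.items.foldl (fun sc p =>
    if PySem.Str.isIn "AttributeName" p.1 = false then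
      sc ++ ["pm.variables.set('" ++ p.1 ++ "', '" ++ p.2 ++ "'+ pm.variables.get('RandomNumber') );\r"]
    else
      sc ++ ["pm.variables.set('" ++ p.1 ++ "','" ++ p.2 ++ "');\r"]) aHeader
  let dic2 := st.d.items.foldl (fun d p => d.insert p.2 p.1) PySem.Dict.empty
  (dic2.items, script)

-- ===== PORT B =====
-- B's _emit is one Python function recursing on depth; Lean is typed, so each depth
-- instance becomes its own definition. State is (pairs, cu counter, ent counter).

-- depth 3: node is the attribute list
def bEmit3 (ent : Int) (node : List String) (pairs : List (String × String)) : List (String × String) :=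
  pairs ++ (PySem.List.enumerate node 1).map (fun p => ("AttributeName" ++ PySem.Int.toStr ent ++ PySem.Int.toStr p.1, p.2))

-- depth 2: bump the entity counter, emit, recurse into the attribute list
def bEmit2 (node : List (String × List String)) (st : List (String × String) × Int × Int) : List (String × String) × Int × Int :=
  node.foldl (fun st p =>
    let ent := st.2.2 + 1
    (bEmit3 ent p.2 (st.1 ++ [("EntityName" ++ PySem.Int.toStr ent, p.1)]), st.2.1, ent)) st

-- depth 1: bump the CU counter, emit, recurse
def bEmit1 (node : List (String × List (String × List String))) (st : List (String × String) × Int × Int) : List (String × String) × Int × Int :=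
  node.foldl (fun st p =>
    let cu := st.2.1 + 1
    bEmit2 p.2 (st.1 ++ [("CuName" ++ PySem.Int.toStr cu, p.1)], cu, st.2.2)) st

-- depth 0: the number comes from the outer enumerate index, no counter bump
def bEmit0 (num : Int) (node : List (String × List (String × List (String × List String)))) (st : List (String × String) × Int × Int) : List (String × String) × Int × Int :=
  node.foldl (fun st p =>
    bEmit1 p.2 (st.1 ++ [("SolutionName" ++ PySem.Int.toStr num, p.1)], st.2.1, st.2.2)) st

def bHeader : List String :=
  ["pm.variables.clear();\r", "\r",
   "pm.variables.set('RandomNumber', (new Date()).toISOString().replace(/[^0-9]/g, '').slice(0, -3) + '' + Math.floor((Math.random() * 100000) + 1));\r",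
   "\r"]

def generate_prerequest_script_alt (sol_details : List (List (String × List (String × List (String × List String))))) : (List (String × String)) × List String :=
  let st := (PySem.List.enumerate sol_details 1).foldl (fun st q => bEmit0 q.1 q.2 st) ([], 0, 0)
  let dict1 := PySem.Dict.ofList st.1
  let script := bHeader ++ dict1.items.map (fun p =>
    if PySem.Str.isIn "AttributeName" p.1 then
      "pm.variables.set('" ++ p.1 ++ "','" ++ p.2 ++ "');\r"
    else
      "pm.variables.set('" ++ p.1 ++ "', '" ++ p.2 ++ "'+ pm.variables.get('RandomNumber') );\r")
  let dic2 := dict1.items.foldl (fun d p => d.insert p.2 p.1) PySem.Dict.empty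
  (dic2.items, script)

-- ===== PRECONDITION & SPEC =====
def Spec_generate_prerequest_script (sol_details : List (List (String × List (String × List (String × List String))))) (out : (List (String × String)) × List String) : Prop := out = generate_prerequest_script_alt sol_details
instance (sol_details : List (List (String × List (String × List (String × List String))))) (out : (List (String × String)) × List String) : Decidable (Spec_generate_prerequest_script sol_details out) := by unfold Spec_generate_prerequest_script; infer_instance

-- ===== CLAIM (what is proved, stated in full; the proofs are below) =====
def Claim_equal_generate_prerequest_script : Prop := ∀ (sol_details : List (List (String × List (String × List (String × List String))))), Dom_generate_prerequest_script sol_details → Spec_generate_prerequest_script sol_details (generate_prerequest_script sol_details)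

-- ===== LEMMAS AND PROOFS =====

-- shorthand for "insert the pairs of l into dict d in order"
def pvIns (d : PySem.Dict String String) (l : List (String × String)) : PySem.Dict String String :=
  l.foldl (fun d p => d.insert p.1 p.2) d

-- B's emitters only append to the pairs accumulator
theorem bEmit2_append (node : List (String × List String)) (st : List (String × String) × Int × Int) :
    bEmit2 node st = (st.1 ++ (bEmit2 node ([], st.2)).1, (bEmit2 node ([], st.2)).2) := by
  induction node generalizing st with
  | nil => simp [bEmit2]
  | cons p rest ih =>
    have h1 : bEmit2 (p :: rest) st = bEmit2 rest
        (bEmit3 (st.2.2 + 1) p.2 (st.1 ++ [("EntityName" ++ PySem.Int.toStr (st.2.2 + 1), p.1)]), st.2.1, st.2.2 + 1) := rfl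
    have h2 : bEmit2 (p :: rest) (([] : List (String × String)), st.2) = bEmit2 rest
        (bEmit3 (st.2.2 + 1) p.2 ([] ++ [("EntityName" ++ PySem.Int.toStr (st.2.2 + 1), p.1)]), st.2.1, st.2.2 + 1) := rfl
    rw [h1, h2,
        ih (bEmit3 (st.2.2 + 1) p.2 (st.1 ++ [("EntityName" ++ PySem.Int.toStr (st.2.2 + 1), p.1)]), st.2.1, st.2.2 + 1),
        ih (bEmit3 (st.2.2 + 1) p.2 ([] ++ [("EntityName" ++ PySem.Int.toStr (st.2.2 + 1), p.1)]), st.2.1, st.2.2 + 1)]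
    simp [bEmit3]

theorem bEmit1_append (node : List (String × List (String × List String))) (st : List (String × String) × Int × Int) :
    bEmit1 node st = (st.1 ++ (bEmit1 node ([], st.2)).1, (bEmit1 node ([], st.2)).2) := by
  induction node generalizing st with
  | nil => simp [bEmit1]
  | cons p rest ih =>
    have h1 : bEmit1 (p :: rest) st = bEmit1 rest
        (bEmit2 p.2 (st.1 ++ [("CuName" ++ PySem.Int.toStr (st.2.1 + 1), p.1)], st.2.1 + 1, st.2.2)) := rfl
    have h2 : bEmit1 (p :: rest) (([] : List (String × String)), st.2) = bEmit1 rest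
        (bEmit2 p.2 ([] ++ [("CuName" ++ PySem.Int.toStr (st.2.1 + 1), p.1)], st.2.1 + 1, st.2.2)) := rfl
    rw [h1, h2,
        ih (bEmit2 p.2 (st.1 ++ [("CuName" ++ PySem.Int.toStr (st.2.1 + 1), p.1)], st.2.1 + 1, st.2.2)),
        ih (bEmit2 p.2 ([] ++ [("CuName" ++ PySem.Int.toStr (st.2.1 + 1), p.1)], st.2.1 + 1, st.2.2)),
        bEmit2_append p.2 (st.1 ++ [("CuName" ++ PySem.Int.toStr (st.2.1 + 1), p.1)], st.2.1 + 1, st.2.2),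
        bEmit2_append p.2 ([] ++ [("CuName" ++ PySem.Int.toStr (st.2.1 + 1), p.1)], st.2.1 + 1, st.2.2)]
    simp

theorem bEmit0_append (num : Int) (node : List (String × List (String × List (String × List String)))) (st : List (String × String) × Int × Int) :
    bEmit0 num node st = (st.1 ++ (bEmit0 num node ([], st.2)).1, (bEmit0 num node ([], st.2)).2) := by
  induction node generalizing st with
  | nil => simp [bEmit0]
  | cons p rest ih =>
    have h1 : bEmit0 num (p :: rest) st = bEmit0 num rest
        (bEmit1 p.2 (st.1 ++ [("SolutionName" ++ PySem.Int.toStr num, p.1)], st.2.1, st.2.2)) := rfl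
    have h2 : bEmit0 num (p :: rest) (([] : List (String × String)), st.2) = bEmit0 num rest
        (bEmit1 p.2 ([] ++ [("SolutionName" ++ PySem.Int.toStr num, p.1)], st.2.1, st.2.2)) := rfl
    rw [h1, h2,
        ih (bEmit1 p.2 (st.1 ++ [("SolutionName" ++ PySem.Int.toStr num, p.1)], st.2.1, st.2.2)),
        ih (bEmit1 p.2 ([] ++ [("SolutionName" ++ PySem.Int.toStr num, p.1)], st.2.1, st.2.2)),
        bEmit1_append p.2 (st.1 ++ [("SolutionName" ++ PySem.Int.toStr num, p.1)], st.2.1, st.2.2),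
        bEmit1_append p.2 ([] ++ [("SolutionName" ++ PySem.Int.toStr num, p.1)], st.2.1, st.2.2)]
    simp

theorem bTop_append (l : List (Int × List (String × List (String × List (String × List String))))) (st : List (String × String) × Int × Int) :
    l.foldl (fun s q => bEmit0 q.1 q.2 s) st =
      (st.1 ++ (l.foldl (fun s q => bEmit0 q.1 q.2 s) ([], st.2)).1,
       (l.foldl (fun s q => bEmit0 q.1 q.2 s) ([], st.2)).2) := by
  induction l generalizing st with
  | nil => simp
  | cons q rest ih =>
    simp only [List.foldl_cons]
    rw [ih (bEmit0 q.1 q.2 st), ih (bEmit0 q.1 q.2 ([], st.2)),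
        bEmit0_append q.1 q.2 st, bEmit0_append q.1 q.2 ([], st.2)]
    simp

-- B preserves the cu counter below depth 1
theorem bEmit2_cu (node : List (String × List String)) (st : List (String × String) × Int × Int) :
    (bEmit2 node st).2.1 = st.2.1 := by
  induction node generalizing st with
  | nil => rfl
  | cons p rest ih => simp only [bEmit2, List.foldl_cons] at *; rw [ih]

-- level 3 (raw fold): A's attribute loop appends the names and inserts exactly B's depth-3 pairs
theorem attrFoldAux (kk : Int) (l : List (Int × String)) (st : ASt) :
    (l.foldl (fun st p =>
      let nm := "AttributeName" ++ PySem.Int.toStr kk ++ PySem.Int.toStr p.1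
      { st with attrs := st.attrs ++ [nm], d := st.d.insert nm p.2 }) st) =
    { st with
      attrs := st.attrs ++ l.map (fun p => "AttributeName" ++ PySem.Int.toStr kk ++ PySem.Int.toStr p.1),
      d := pvIns st.d (l.map (fun p => ("AttributeName" ++ PySem.Int.toStr kk ++ PySem.Int.toStr p.1, p.2))) } := by
  induction l generalizing st with
  | nil => simp [pvIns]
  | cons p rest ih => simp [ih, pvIns]

theorem aAttrLoop_eq (kk : Int) (attrs : List String) (st : ASt) :
    aAttrLoop kk attrs st =
      { st with
        attrs := st.attrs ++ (PySem.List.enumerate attrs 1).map (fun p => "AttributeName" ++ PySem.Int.toStr kk ++ PySem.Int.toStr p.1),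
        d := pvIns st.d (bEmit3 kk attrs []) } := by
  have h := attrFoldAux kk (PySem.List.enumerate attrs 1) st
  simpa [aAttrLoop, bEmit3] using h

-- level 2: A's entity loop vs B's depth-2 emitter
theorem level2 (node : List (String × List String)) (st : ASt) :
    (aEntLoop node st).sols = st.sols ∧
    (aEntLoop node st).cus = st.cus ∧
    ((aEntLoop node st).ents.length : Int) = (bEmit2 node ([], (st.cus.length : Int), (st.ents.length : Int))).2.2 ∧
    (aEntLoop node st).d = pvIns st.d (bEmit2 node ([], (st.cus.length : Int), (st.ents.length : Int))).1 := by
  induction node generalizing st with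
  | nil => simp [aEntLoop, bEmit2, pvIns]
  | cons p rest ih =>
    have hA : aEntLoop (p :: rest) st = aEntLoop rest (aAttrLoop ((st.ents.length : Int) + 1) p.2
        { st with ents := st.ents ++ ["EntityName" ++ PySem.Int.toStr ((st.ents.length : Int) + 1)],
                  d := st.d.insert ("EntityName" ++ PySem.Int.toStr ((st.ents.length : Int) + 1)) p.1 }) := rfl
    have hB : bEmit2 (p :: rest) (([] : List (String × String)), (st.cus.length : Int), (st.ents.length : Int)) = bEmit2 rest
        (bEmit3 ((st.ents.length : Int) + 1) p.2 ([] ++ [("EntityName" ++ PySem.Int.toStr ((st.ents.length : Int) + 1), p.1)]),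
         (st.cus.length : Int), (st.ents.length : Int) + 1) := rfl
    rw [hA, hB, aAttrLoop_eq,
        bEmit2_append rest (bEmit3 ((st.ents.length : Int) + 1) p.2 ([] ++ [("EntityName" ++ PySem.Int.toStr ((st.ents.length : Int) + 1), p.1)]),
          (st.cus.length : Int), (st.ents.length : Int) + 1)]
    obtain ⟨h1, h2, h3, h4⟩ := ih
      { st with
        ents := st.ents ++ ["EntityName" ++ PySem.Int.toStr ((st.ents.length : Int) + 1)],
        attrs := st.attrs ++ (PySem.List.enumerate p.2 1).map (fun q => "AttributeName" ++ PySem.Int.toStr ((st.ents.length : Int) + 1) ++ PySem.Int.toStr q.1),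
        d := pvIns (st.d.insert ("EntityName" ++ PySem.Int.toStr ((st.ents.length : Int) + 1)) p.1)
               (bEmit3 ((st.ents.length : Int) + 1) p.2 []) }
    refine ⟨?_, ?_, ?_, ?_⟩
    · simpa using h1
    · simpa using h2
    · simp only at h3 ⊢
      rw [h3]
      simp
    · simp only at h4 ⊢
      rw [h4]
      simp [bEmit3, pvIns]

-- level 1: A's CU loop vs B's depth-1 emitter
theorem level1 (node : List (String × List (String × List String))) (st : ASt) :
    (aCuLoop node st).sols = st.sols ∧
    ((aCuLoop node st).cus.length : Int) = (bEmit1 node ([], (st.cus.length : Int), (st.ents.length : Int))).2.1 ∧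
    ((aCuLoop node st).ents.length : Int) = (bEmit1 node ([], (st.cus.length : Int), (st.ents.length : Int))).2.2 ∧
    (aCuLoop node st).d = pvIns st.d (bEmit1 node ([], (st.cus.length : Int), (st.ents.length : Int))).1 := by
  induction node generalizing st with
  | nil => simp [aCuLoop, bEmit1, pvIns]
  | cons p rest ih =>
    have hA : aCuLoop (p :: rest) st = aCuLoop rest (aEntLoop p.2
        { st with cus := st.cus ++ ["CuName" ++ PySem.Int.toStr ((st.cus.length : Int) + 1)],
                  d := st.d.insert ("CuName" ++ PySem.Int.toStr ((st.cus.length : Int) + 1)) p.1 }) := rfl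
    have hB : bEmit1 (p :: rest) (([] : List (String × String)), (st.cus.length : Int), (st.ents.length : Int)) = bEmit1 rest
        (bEmit2 p.2 ([] ++ [("CuName" ++ PySem.Int.toStr ((st.cus.length : Int) + 1), p.1)],
          (st.cus.length : Int) + 1, (st.ents.length : Int))) := rfl
    obtain ⟨e1, e2, e3, e4⟩ := level2 p.2
      { st with cus := st.cus ++ ["CuName" ++ PySem.Int.toStr ((st.cus.length : Int) + 1)],
                d := st.d.insert ("CuName" ++ PySem.Int.toStr ((st.cus.length : Int) + 1)) p.1 }
    obtain ⟨h1, h2, h3, h4⟩ := ih (aEntLoop p.2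
      { st with cus := st.cus ++ ["CuName" ++ PySem.Int.toStr ((st.cus.length : Int) + 1)],
                d := st.d.insert ("CuName" ++ PySem.Int.toStr ((st.cus.length : Int) + 1)) p.1 })
    -- the counter pair after A's recursive call equals B's state after the depth-2 emitter
    have hpair : (((aEntLoop p.2
        { st with cus := st.cus ++ ["CuName" ++ PySem.Int.toStr ((st.cus.length : Int) + 1)],
                  d := st.d.insert ("CuName" ++ PySem.Int.toStr ((st.cus.length : Int) + 1)) p.1 }).cus.length : Int),
        ((aEntLoop p.2
        { st with cus := st.cus ++ ["CuName" ++ PySem.Int.toStr ((st.cus.length : Int) + 1)],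
                  d := st.d.insert ("CuName" ++ PySem.Int.toStr ((st.cus.length : Int) + 1)) p.1 }).ents.length : Int)) =
        (bEmit2 p.2 ([] ++ [("CuName" ++ PySem.Int.toStr ((st.cus.length : Int) + 1), p.1)],
          (st.cus.length : Int) + 1, (st.ents.length : Int))).2 := by
      rw [bEmit2_append p.2 ([] ++ [("CuName" ++ PySem.Int.toStr ((st.cus.length : Int) + 1), p.1)],
          (st.cus.length : Int) + 1, (st.ents.length : Int))]
      refine Prod.ext ?_ ?_
      · simp [e2, bEmit2_cu]
      · simp only at e3 ⊢
        rw [e3]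
        simp
    rw [hA, hB, bEmit1_append rest (bEmit2 p.2 ([] ++ [("CuName" ++ PySem.Int.toStr ((st.cus.length : Int) + 1), p.1)],
        (st.cus.length : Int) + 1, (st.ents.length : Int)))]
    rw [hpair] at h2 h3 h4
    refine ⟨?_, ?_, ?_, ?_⟩
    · rw [h1, e1]
    · simp only at h2 ⊢
      rw [h2]
    · simp only at h3 ⊢
      rw [h3]
    · simp only at h4 ⊢
      rw [h4, e4,
          bEmit2_append p.2 ([] ++ [("CuName" ++ PySem.Int.toStr ((st.cus.length : Int) + 1), p.1)],
            (st.cus.length : Int) + 1, (st.ents.length : Int))]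
      simp [pvIns]

-- level 0 row: the inner 'for j in sol_details[i]' loop at a fixed ii
theorem level0row (num : Int) (row : List (String × List (String × List (String × List String)))) (st : ASt) :
    (((row.foldl (fun st p =>
        let nm := "SolutionName" ++ PySem.Int.toStr num
        aCuLoop p.2 { st with sols := st.sols ++ [nm], d := st.d.insert nm p.1 }) st).cus.length : Int) =
      (bEmit0 num row ([], (st.cus.length : Int), (st.ents.length : Int))).2.1) ∧
    (((row.foldl (fun st p =>
        let nm := "SolutionName" ++ PySem.Int.toStr num
        aCuLoop p.2 { st with sols := st.sols ++ [nm], d := st.d.insert nm p.1 }) st).ents.length : Int) =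
      (bEmit0 num row ([], (st.cus.length : Int), (st.ents.length : Int))).2.2) ∧
    (row.foldl (fun st p =>
        let nm := "SolutionName" ++ PySem.Int.toStr num
        aCuLoop p.2 { st with sols := st.sols ++ [nm], d := st.d.insert nm p.1 }) st).d =
      pvIns st.d (bEmit0 num row ([], (st.cus.length : Int), (st.ents.length : Int))).1 := by
  induction row generalizing st with
  | nil => simp [bEmit0, pvIns]
  | cons p rest ih =>
    have hB : bEmit0 num (p :: rest) (([] : List (String × String)), (st.cus.length : Int), (st.ents.length : Int)) = bEmit0 num rest
        (bEmit1 p.2 ([] ++ [("SolutionName" ++ PySem.Int.toStr num, p.1)], (st.cus.length : Int), (st.ents.length : Int))) := rfl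
    obtain ⟨f1, f2, f3, f4⟩ := level1 p.2
      { st with sols := st.sols ++ ["SolutionName" ++ PySem.Int.toStr num],
                d := st.d.insert ("SolutionName" ++ PySem.Int.toStr num) p.1 }
    obtain ⟨h1, h2, h3⟩ := ih (aCuLoop p.2
      { st with sols := st.sols ++ ["SolutionName" ++ PySem.Int.toStr num],
                d := st.d.insert ("SolutionName" ++ PySem.Int.toStr num) p.1 })
    have hpair : (((aCuLoop p.2
        { st with sols := st.sols ++ ["SolutionName" ++ PySem.Int.toStr num],
                  d := st.d.insert ("SolutionName" ++ PySem.Int.toStr num) p.1 }).cus.length : Int),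
        ((aCuLoop p.2
        { st with sols := st.sols ++ ["SolutionName" ++ PySem.Int.toStr num],
                  d := st.d.insert ("SolutionName" ++ PySem.Int.toStr num) p.1 }).ents.length : Int)) =
        (bEmit1 p.2 ([] ++ [("SolutionName" ++ PySem.Int.toStr num, p.1)],
          (st.cus.length : Int), (st.ents.length : Int))).2 := by
      rw [bEmit1_append p.2 ([] ++ [("SolutionName" ++ PySem.Int.toStr num, p.1)],
          (st.cus.length : Int), (st.ents.length : Int))]
      refine Prod.ext ?_ ?_
      · simp only at f2 ⊢
        rw [f2]
      · simp only at f3 ⊢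
        rw [f3]
    simp only [List.foldl_cons]
    rw [hB, bEmit0_append num rest (bEmit1 p.2 ([] ++ [("SolutionName" ++ PySem.Int.toStr num, p.1)],
        (st.cus.length : Int), (st.ents.length : Int)))]
    rw [hpair] at h1 h2 h3
    refine ⟨?_, ?_, ?_⟩
    · simp only at h1 ⊢
      rw [h1]
    · simp only at h2 ⊢
      rw [h2]
    · simp only at h3 ⊢
      rw [h3, f4,
          bEmit1_append p.2 ([] ++ [("SolutionName" ++ PySem.Int.toStr num, p.1)],
            (st.cus.length : Int), (st.ents.length : Int))]
      simp [pvIns]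

-- level 0: the outer enumerate loop
theorem level0 (l : List (Int × List (String × List (String × List (String × List String))))) (st : ASt) :
    (((l.foldl (fun st q =>
      q.2.foldl (fun st p =>
        let nm := "SolutionName" ++ PySem.Int.toStr q.1
        aCuLoop p.2 { st with sols := st.sols ++ [nm], d := st.d.insert nm p.1 }) st) st).cus.length : Int) =
      (l.foldl (fun s q => bEmit0 q.1 q.2 s) ([], (st.cus.length : Int), (st.ents.length : Int))).2.1) ∧
    (((l.foldl (fun st q =>
      q.2.foldl (fun st p =>
        let nm := "SolutionName" ++ PySem.Int.toStr q.1
        aCuLoop p.2 { st with sols := st.sols ++ [nm], d := st.d.insert nm p.1 }) st) st).ents.length : Int) =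
      (l.foldl (fun s q => bEmit0 q.1 q.2 s) ([], (st.cus.length : Int), (st.ents.length : Int))).2.2) ∧
    (l.foldl (fun st q =>
      q.2.foldl (fun st p =>
        let nm := "SolutionName" ++ PySem.Int.toStr q.1
        aCuLoop p.2 { st with sols := st.sols ++ [nm], d := st.d.insert nm p.1 }) st) st).d =
      pvIns st.d (l.foldl (fun s q => bEmit0 q.1 q.2 s) ([], (st.cus.length : Int), (st.ents.length : Int))).1 := by
  induction l generalizing st with
  | nil => simp [pvIns]
  | cons q rest ih =>
    obtain ⟨r1, r2, r3⟩ := level0row q.1 q.2 st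
    obtain ⟨h1, h2, h3⟩ := ih (q.2.foldl (fun st p =>
        let nm := "SolutionName" ++ PySem.Int.toStr q.1
        aCuLoop p.2 { st with sols := st.sols ++ [nm], d := st.d.insert nm p.1 }) st)
    have hpair : (((q.2.foldl (fun st p =>
        let nm := "SolutionName" ++ PySem.Int.toStr q.1
        aCuLoop p.2 { st with sols := st.sols ++ [nm], d := st.d.insert nm p.1 }) st).cus.length : Int),
        ((q.2.foldl (fun st p =>
        let nm := "SolutionName" ++ PySem.Int.toStr q.1
        aCuLoop p.2 { st with sols := st.sols ++ [nm], d := st.d.insert nm p.1 }) st).ents.length : Int)) =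
        (bEmit0 q.1 q.2 ([], (st.cus.length : Int), (st.ents.length : Int))).2 :=
      Prod.ext r1 r2
    simp only [List.foldl_cons]
    rw [bTop_append rest (bEmit0 q.1 q.2 ([], (st.cus.length : Int), (st.ents.length : Int)))]
    rw [hpair] at h1 h2 h3
    refine ⟨?_, ?_, ?_⟩
    · simp only at h1 ⊢
      rw [h1]
    · simp only at h2 ⊢
      rw [h2]
    · simp only at h3 ⊢
      rw [h3, r3,
          bEmit0_append q.1 q.2 ([], (st.cus.length : Int), (st.ents.length : Int))]
      simp [pvIns]

-- the script loop: A's append-fold is the header followed by a map over the items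
theorem scriptFold (l : List (String × String)) (init : List String) :
    l.foldl (fun sc p =>
      if PySem.Str.isIn "AttributeName" p.1 = false then
        sc ++ ["pm.variables.set('" ++ p.1 ++ "', '" ++ p.2 ++ "'+ pm.variables.get('RandomNumber') );\r"]
      else
        sc ++ ["pm.variables.set('" ++ p.1 ++ "','" ++ p.2 ++ "');\r"]) init =
    init ++ l.map (fun p =>
      if PySem.Str.isIn "AttributeName" p.1 then
        "pm.variables.set('" ++ p.1 ++ "','" ++ p.2 ++ "');\r"
      else
        "pm.variables.set('" ++ p.1 ++ "', '" ++ p.2 ++ "'+ pm.variables.get('RandomNumber') );\r") := by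
  induction l generalizing init with
  | nil => simp
  | cons p rest ih =>
    simp only [List.foldl_cons, List.map_cons]
    rw [ih]
    cases hc : PySem.Str.isIn "AttributeName" p.1 <;> simp

-- ===== VERDICT (by name: the statement is the Claim_ definition above) =====
theorem generate_prerequest_script_spec : Claim_equal_generate_prerequest_script := by
  intro sd _
  unfold Spec_generate_prerequest_script
  have hd : (aSolLoop sd ⟨[], [], [], [], PySem.Dict.empty⟩).d =
      PySem.Dict.ofList ((PySem.List.enumerate sd 1).foldl (fun s q => bEmit0 q.1 q.2 s) ([], 0, 0)).1 :=
    (level0 (PySem.List.enumerate sd 1) ⟨[], [], [], [], PySem.Dict.empty⟩).2.2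
  simp only [generate_prerequest_script, generate_prerequest_script_alt]
  rw [hd, scriptFold]
  rfl
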